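-- pv_equiv track=rewrite | github.com/noahhhtx/PoliPollsUSA | process_data.py | count_nones
-- ===== SOURCE A (Python) =====
-- def count_nones(x):
--     i = 0
--     k = None
--     for j in x:
--         if j is None:
--             i+=1
--         if j is not None:
--             k = j
--     return i, k
-- ===== SOURCE B (Python) =====
-- def count_nones(x):
--     items = list(x)
--     count = sum(1 for j in items if j is None)
--     non_nones = [j for j in items if j is not None]
--     k = non_nones[-1] if non_nones else None
--     return count, k
-- ===== Notes on version B (the rewrite author's own statement) =====
-- stated objective: simpler
-- what changed: Replaced the single fused accumulation loop (mutable counter and last-seen variable updated per element) with two independent comprehension-based passes: a sum counting None values and a filtered list whose last element gives the result.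
import Mathlib
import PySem

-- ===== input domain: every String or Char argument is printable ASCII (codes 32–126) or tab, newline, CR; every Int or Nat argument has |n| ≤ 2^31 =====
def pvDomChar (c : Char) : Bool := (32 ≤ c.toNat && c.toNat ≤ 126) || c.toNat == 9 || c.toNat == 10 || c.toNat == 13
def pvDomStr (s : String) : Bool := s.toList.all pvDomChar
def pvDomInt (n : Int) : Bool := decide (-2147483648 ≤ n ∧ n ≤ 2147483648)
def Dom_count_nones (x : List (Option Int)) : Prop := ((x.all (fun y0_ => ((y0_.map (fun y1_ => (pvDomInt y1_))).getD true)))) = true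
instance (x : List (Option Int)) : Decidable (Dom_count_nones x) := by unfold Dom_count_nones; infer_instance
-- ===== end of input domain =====

-- B replaces A's fused accumulation loop with two independent comprehension passes
-- (count the Nones; filter out the Nones and take the last element): simpler decomposition.

-- ===== PORT A =====
-- fused loop: state (i, k); per element, bump i if None, overwrite k if not None
def count_nones (x : List (Option Int)) : Int × Option Int :=
  x.foldl
    (fun (s : Int × Option Int) j =>
      (if j.isNone then s.1 + 1 else s.1,
       if j.isSome then j else s.2))
    (0, none)

-- ===== PORT B =====
-- two independent passes: sum(1 for j if j is None) and the filtered non-None list's last element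
def count_nones_alt (x : List (Option Int)) : Int × Option Int :=
  let count : Int := (((x.filter (fun j => j.isNone)).map (fun _ => (1 : Int))).sum)
  let non_nones := x.filter (fun j => !j.isNone)
  let k : Option Int := (non_nones.getLast?).getD none
  (count, k)

-- ===== PRECONDITION & SPEC =====
def Spec_count_nones (x : List (Option Int)) (out : Int × Option Int) : Prop := out = count_nones_alt x
instance (x : List (Option Int)) (out : Int × Option Int) : Decidable (Spec_count_nones x out) := by unfold Spec_count_nones; infer_instance

-- ===== CLAIM (what is proved, stated in full; the proofs are below) =====
def Claim_equal_count_nones : Prop := ∀ (x : List (Option Int)), Dom_count_nones x → Spec_count_nones x (count_nones x)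

-- ===== LEMMAS AND PROOFS =====

theorem getLast?_getD_cons (l : List (Option Int)) (v : Int) (k : Option Int) :
    ((some v :: l).getLast?).getD k = (l.getLast?).getD (some v) := by
  rw [List.getLast?_cons]
  simp

theorem count_nones_loop (x : List (Option Int)) (i : Int) (k : Option Int) :
    x.foldl
      (fun (s : Int × Option Int) j =>
        (if j.isNone then s.1 + 1 else s.1,
         if j.isSome then j else s.2))
      (i, k)
    = (i + ((x.filter (fun j => j.isNone)).map (fun _ => (1 : Int))).sum,
       ((x.filter (fun j => !j.isNone)).getLast?).getD k) := by
  induction x generalizing i k with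
  | nil => simp
  | cons h t ih =>
    cases h with
    | none =>
      rw [List.foldl_cons, ih]
      simp
      ring
    | some v =>
      rw [List.foldl_cons, ih]
      simp only [List.filter_cons, Option.isNone_some, Option.isSome_some, Bool.not_false,
        if_true, Bool.false_eq_true, ite_false, getLast?_getD_cons]

-- ===== VERDICT (by name: the statement is the Claim_ definition above) =====
theorem count_nones_spec : Claim_equal_count_nones := by
  intro x _
  show count_nones x = count_nones_alt x
  rw [count_nones, count_nones_alt, count_nones_loop]
  simp
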